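-- pv_equiv track=rewrite | github.com/Luis-Fernando-2025/bot-academico | gestor_avisos.py | normalizar_avisos
-- ===== SOURCE A (Python) =====
-- MIN_DIA = 5
--
-- MAX_DIA = 30
--
-- MAX_AVISOS = 4
--
-- AVISOS_DEFAULT = [30, 10, 5]
--
-- def normalizar_avisos(avisos):
--     if avisos is None:
--         return AVISOS_DEFAULT
--     try:
--         avisos = [int(x) for x in avisos]
--     except ValueError:
--         raise ValueError("Todos los avisos deben ser números enteros.")
--     filtrados = sorted({d for d in avisos if MIN_DIA <= d <= MAX_DIA}, reverse=True)
--     if not filtrados: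
--         return AVISOS_DEFAULT
--     return filtrados[:MAX_AVISOS]
-- ===== SOURCE B (Python) =====
-- MIN_DIA = 5
--
-- MAX_DIA = 30
--
-- MAX_AVISOS = 4
--
-- AVISOS_DEFAULT = [30, 10, 5]
--
-- def normalizar_avisos(avisos):
--     if avisos is None:
--         return AVISOS_DEFAULT
--     try:
--         validos = {int(x) for x in avisos}
--     except ValueError:
--         raise ValueError("Todos los avisos deben ser números enteros.")
--     res = []
--     for d in range(MAX_DIA, MIN_DIA - 1, -1):
--         if d in validos:
--             res.append(d)
--             if len(res) == MAX_AVISOS: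
--                 break
--     return res if res else AVISOS_DEFAULT
-- ===== Notes on version B (the rewrite author's own statement) =====
-- stated objective: alternative
-- what changed: Replaces filter + set + comparison sort + slice with a bucket-style descending walk over the fixed day range 30..5, appending members of the set of given days and stopping at 4 elements (a counting-sort specialization that eliminates the comparison sort).
import Mathlib
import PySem

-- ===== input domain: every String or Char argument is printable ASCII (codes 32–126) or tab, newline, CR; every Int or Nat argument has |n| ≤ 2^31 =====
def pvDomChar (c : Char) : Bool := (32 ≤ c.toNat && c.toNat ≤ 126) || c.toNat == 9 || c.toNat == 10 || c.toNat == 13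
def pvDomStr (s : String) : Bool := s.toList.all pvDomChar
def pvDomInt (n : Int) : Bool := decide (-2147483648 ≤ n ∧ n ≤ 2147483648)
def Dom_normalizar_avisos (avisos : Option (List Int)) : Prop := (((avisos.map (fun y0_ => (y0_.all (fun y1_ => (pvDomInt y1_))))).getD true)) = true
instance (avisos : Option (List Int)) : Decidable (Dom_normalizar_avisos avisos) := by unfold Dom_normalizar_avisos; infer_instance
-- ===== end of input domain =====

-- B replaces A's filter+set+sort(reverse)+slice by a descending bucket walk over the fixed
-- day range 30..5 that stops after 4 hits; same return value everywhere (inputs are Ints,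
-- so the int() conversion never raises and both ports are total).

-- ===== PORT A =====
def normalizar_avisos (avisos : Option (List Int)) : List Int :=
  match avisos with
  | none => [30, 10, 5]
  | some xs =>
    -- avisos = [int(x) for x in avisos]  (identity on Ints; ValueError impossible)
    let avisos' := xs.map (fun x => x)
    -- filtrados = sorted({d for d in avisos if MIN_DIA <= d <= MAX_DIA}, reverse=True)
    let filtrados := PySem.List.sorted
      (PySem.Set.ofList (avisos'.filter (fun d => decide (5 ≤ d) && decide (d ≤ 30))))
      (fun x => x) true
    if filtrados = [] then [30, 10, 5]
    else PySem.List.slice filtrados none (some 4)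

-- ===== PORT B =====
-- the 'for d in range(30, 4, -1): … break' loop of Source B
def pvAltLoop (s : PySem.Set Int) : List Int → List Int → List Int
  | res, [] => res
  | res, d :: ds =>
    if PySem.Set.contains s d then
      if (res ++ [d]).length = 4 then res ++ [d] else pvAltLoop s (res ++ [d]) ds
    else pvAltLoop s res ds

def normalizar_avisos_alt (avisos : Option (List Int)) : List Int :=
  match avisos with
  | none => [30, 10, 5]
  | some xs =>
    let validos := PySem.Set.ofList (xs.map (fun x => x))
    let res := pvAltLoop validos [] (PySem.List.pyRange 30 4 (-1))
    if res = [] then [30, 10, 5] else res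

-- ===== PRECONDITION & SPEC =====
def Spec_normalizar_avisos (avisos : Option (List Int)) (out : List Int) : Prop := out = normalizar_avisos_alt avisos
instance (avisos : Option (List Int)) (out : List Int) : Decidable (Spec_normalizar_avisos avisos out) := by unfold Spec_normalizar_avisos; infer_instance

-- ===== CLAIM (what is proved, stated in full; the proofs are below) =====
def Claim_equal_normalizar_avisos : Prop := ∀ (avisos : Option (List Int)), Dom_normalizar_avisos avisos → Spec_normalizar_avisos avisos (normalizar_avisos avisos)

-- ===== LEMMAS AND PROOFS =====

-- the fixed descending day range
def pvDays : List Int := [30, 29, 28, 27, 26, 25, 24, 23, 22, 21, 20, 19, 18, 17, 16, 15, 14, 13, 12, 11, 10, 9, 8, 7, 6, 5]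

theorem pvRange_eq_days : PySem.List.pyRange 30 4 (-1) = pvDays := by decide

theorem mem_pvDays (x : Int) : x ∈ pvDays ↔ 5 ≤ x ∧ x ≤ 30 := by
  simp only [pvDays, List.mem_cons, List.not_mem_nil, or_false]
  omega

theorem pvDays_pairwise : pvDays.Pairwise (fun a b => (b : Int) < a) := by decide

theorem pvDays_nodup : pvDays.Nodup := by decide

-- the loop with break computes take (4 - |res|) of the filtered remainder
theorem pvAltLoop_eq (s : PySem.Set Int) :
    ∀ (L res : List Int), res.length < 4 →
      pvAltLoop s res L = res ++ (L.filter (fun d => PySem.Set.contains s d)).take (4 - res.length) := by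
  intro L
  induction L with
  | nil => intro res h; simp only [pvAltLoop, List.filter_nil, List.take_nil, List.append_nil]
  | cons d ds ih =>
    intro res h
    simp only [pvAltLoop, List.filter_cons]
    by_cases hc : PySem.Set.contains s d = true
    · rw [if_pos hc, if_pos hc]
      have hk : 4 - res.length = (3 - res.length) + 1 := by omega
      rw [hk, List.take_succ_cons]
      by_cases h4 : (res ++ [d]).length = 4
      · rw [if_pos h4]
        have h0 : 3 - res.length = 0 := by
          simp only [List.length_append, List.length_cons, List.length_nil] at h4; omega
        rw [h0, List.take_zero]
      · have hlen : (res ++ [d]).length < 4 := by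
          simp only [List.length_append, List.length_cons, List.length_nil] at h4 ⊢; omega
        rw [if_neg h4, ih (res ++ [d]) hlen]
        have h3 : 4 - (res ++ [d]).length = 3 - res.length := by
          simp only [List.length_append, List.length_cons, List.length_nil]; omega
        rw [h3, List.append_assoc, List.singleton_append]
    · rw [if_neg hc, if_neg hc, ih res h]

-- A's reverse-sorted set equals the descending-range filter
theorem sorted_eq_filter_days (xs : List Int) :
    PySem.List.sorted (PySem.Set.ofList (xs.filter (fun d => decide (5 ≤ d) && decide (d ≤ 30))))
      (fun x => x) true
    = pvDays.filter (fun d => decide (d ∈ xs)) := by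
  apply PySem.List.sorted_rev_eq_of_perm_of_pairwise_gt
  · rw [List.perm_ext_iff_of_nodup (pvDays_nodup.filter _) (PySem.Set.nodup_ofList _)]
    intro a
    simp only [List.mem_filter, PySem.Set.mem_ofList, mem_pvDays, decide_eq_true_eq,
      Bool.and_eq_true]
    tauto
  · exact pvDays_pairwise.sublist (List.filter_sublist)

theorem contains_ofList (xs : List Int) (d : Int) :
    PySem.Set.contains (PySem.Set.ofList xs) d = decide (d ∈ xs) := by
  by_cases h : d ∈ xs <;> simp [PySem.Set.mem_ofList, h]

-- ===== VERDICT (by name: the statement is the Claim_ definition above) =====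
theorem normalizar_avisos_spec : Claim_equal_normalizar_avisos := by
  intro avisos _
  unfold Spec_normalizar_avisos
  match avisos with
  | none => rfl
  | some xs =>
    simp only [normalizar_avisos, normalizar_avisos_alt, List.map_id_fun', id_eq]
    rw [pvRange_eq_days, pvAltLoop_eq _ _ [] (by decide), sorted_eq_filter_days xs,
      List.filter_congr (fun d _ => contains_ofList xs d)]
    simp only [List.nil_append, List.length_nil, Nat.sub_zero]
    by_cases hE : pvDays.filter (fun d => decide (d ∈ xs)) = []
    · rw [if_pos hE, hE, List.take_nil, if_pos rfl]
    · rw [if_neg hE, if_neg (by simp [List.take_eq_nil_iff, hE]),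
        show ((4 : Int)) = ((4 : Nat) : Int) from rfl, PySem.List.slice_to_natCast]
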